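-- pv_equiv track=rewrite | github.com/crem99/python | .github/workflows/Classification/Digits con PCA.py | find_most_confused
-- ===== SOURCE A (Python) =====
-- def find_most_confused(cm, top_n=5):
--     confused = []
--     for i in range(len(cm)):
--         for j in range(len(cm)):
--             if i != j and cm[i][j] > 0:
--                 confused.append(((i, j), cm[i][j]))
--     confused.sort(key=lambda x: x[1], reverse=True)
--     return confused[:top_n]
-- ===== SOURCE B (Python) =====
-- import bisect
--
-- def find_most_confused(cm, top_n=5):
--     n = len(cm)
--     ordered = []
--     for i, row in enumerate(cm):
--         for j, v in enumerate(row[:n]):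
--             if i != j and v > 0:
--                 bisect.insort(ordered, ((i, j), v), key=lambda x: -x[1])
--     return ordered[:top_n]
-- ===== Notes on version B (the rewrite author's own statement) =====
-- stated objective: alternative
-- what changed: The index-based double loop with repeated cm[i][j] subscripting followed by a full batch sort is replaced by an enumerate scan that maintains the descending-by-count order online, binary-inserting each confused pair with bisect.insort as it is found (insort_right on a negated key reproduces the stable descending tie order exactly); it trades the batch sort's O(k log k) for O(k^2) worst-case list insertion.
import Mathlib
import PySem

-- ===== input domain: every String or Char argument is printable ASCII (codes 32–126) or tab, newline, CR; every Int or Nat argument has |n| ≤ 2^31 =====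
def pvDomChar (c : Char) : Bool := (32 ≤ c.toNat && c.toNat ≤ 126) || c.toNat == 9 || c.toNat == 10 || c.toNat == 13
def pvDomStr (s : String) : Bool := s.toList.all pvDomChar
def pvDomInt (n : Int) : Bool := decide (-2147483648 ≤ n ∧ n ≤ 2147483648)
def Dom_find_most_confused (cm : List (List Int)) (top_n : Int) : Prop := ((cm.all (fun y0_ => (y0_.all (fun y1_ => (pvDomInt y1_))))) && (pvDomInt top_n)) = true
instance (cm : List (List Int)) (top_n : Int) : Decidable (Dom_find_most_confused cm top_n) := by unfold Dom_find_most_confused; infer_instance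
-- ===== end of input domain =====

-- B replaces A's index double loop + batch sort by an enumerate scan that keeps the result in
-- descending order online via binary insertion (bisect.insort on a negated key); an alternative
-- of similar cost, not claimed faster.

-- ===== PORT A =====
def find_most_confused (cm : List (List Int)) (top_n : Int) : List ((Int × Int) × Int) :=
  -- for i in range(len(cm)): for j in range(len(cm)): if i != j and cm[i][j] > 0: append ((i,j), cm[i][j])
  let confused : List ((Int × Int) × Int) :=
    (PySem.List.pyRange 0 (cm.length : Int) 1).foldl (fun acc i =>
      (PySem.List.pyRange 0 (cm.length : Int) 1).foldl (fun acc j =>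
        if i ≠ j ∧ 0 < PySem.List.pyGetD (PySem.List.pyGetD cm i []) j 0 then
          acc ++ [((i, j), PySem.List.pyGetD (PySem.List.pyGetD cm i []) j 0)]
        else acc) acc) []
  -- confused.sort(key=lambda x: x[1], reverse=True); return confused[:top_n]
  PySem.List.slice (PySem.List.sorted confused (fun x => x.2) true) none (some top_n)

-- ===== PORT B =====
-- bisect.insort(ordered, e, key=lambda x: -x[1]) (insort_right on the negated count) is ported as
-- PySem.List.insertBy with the descending comparator: insert e after the elements whose count is ≥ e's.
def find_most_confused_alt (cm : List (List Int)) (top_n : Int) : List ((Int × Int) × Int) :=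
  let ordered : List ((Int × Int) × Int) :=
    (PySem.List.enumerate cm 0).foldl (fun acc p =>
      (PySem.List.enumerate (PySem.List.slice p.2 none (some (cm.length : Int))) 0).foldl (fun acc q =>
        if p.1 ≠ q.1 ∧ 0 < q.2 then
          PySem.List.insertBy (fun a b => decide (b.2 < a.2)) ((p.1, q.1), q.2) acc
        else acc) acc) []
  PySem.List.slice ordered none (some top_n)

-- ===== PRECONDITION & SPEC =====
-- Pre_ excludes exactly the ragged matrices on which Python A raises IndexError (some row i
-- lacks a column j < len(cm), j ≠ i, that A's loop reads).
def Pre_find_most_confused (cm : List (List Int)) (top_n : Int) : Prop :=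
  ∀ i < cm.length, ∀ j < cm.length, j ≠ i → j < (cm.getD i []).length
instance (cm : List (List Int)) (top_n : Int) : Decidable (Pre_find_most_confused cm top_n) := by
  unfold Pre_find_most_confused; infer_instance

def pvWitness_find_most_confused : List (List Int) × Int := ([[0, 2], [3, 0]], 5)

def Spec_find_most_confused (cm : List (List Int)) (top_n : Int) (out : List ((Int × Int) × Int)) : Prop :=
  out = find_most_confused_alt cm top_n
instance (cm : List (List Int)) (top_n : Int) (out : List ((Int × Int) × Int)) : Decidable (Spec_find_most_confused cm top_n out) := by
  unfold Spec_find_most_confused; infer_instance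

-- ===== CLAIM =====
def Claim_equal_find_most_confused : Prop := ∀ (cm : List (List Int)) (top_n : Int), Dom_find_most_confused cm top_n → Pre_find_most_confused cm top_n → Spec_find_most_confused cm top_n (find_most_confused cm top_n)

-- ===== LEMMAS AND PROOFS =====

theorem filterMap_if_eq {α β : Type} (p : α → Prop) [DecidablePred p] (f : α → β) (l : List α) :
    l.filterMap (fun x => if p x then some (f x) else none)
      = (l.filter (fun x => decide (p x))).map f := by
  induction l with
  | nil => simp
  | cons x xs ih =>
    by_cases h : p x <;> simp [h, ih]

theorem rowBridge (row : List Int) (n i : Nat) :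
    (List.range (row.take n).length).filterMap (fun (j : Nat) =>
        if (i:Int) ≠ (j:Int) ∧ 0 < (row.take n).getD j 0
        then some (((i:Int), (j:Int)), (row.take n).getD j 0) else none)
      = ((List.range n).filter (fun (j : Nat) => decide ((i:Int) ≠ (j:Int) ∧ 0 < row.getD j 0))).map
          (fun (j : Nat) => (((i:Int), (j:Int)), row.getD j 0)) := by
  have hm : (row.take n).length = min n row.length := by simp
  set m := min n row.length with hmdef
  have hmn : m ≤ n := by omega
  have hsplit : List.range n = List.range m ++ (List.range (n - m)).map (fun x => m + x) := by
    rw [← List.range_add]; congr 1; omega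
  have hagree : ∀ j < m, (row.take n).getD j 0 = row.getD j 0 := by
    intro j hj
    have hj1 : j < (row.take n).length := by omega
    have hj2 : j < row.length := by omega
    rw [List.getD_eq_getElem _ _ hj1, List.getD_eq_getElem _ _ hj2]
    simp
  rw [hsplit, List.filter_append, List.map_append]
  have htail : ((List.range (n - m)).map (fun x => m + x)).filter
      (fun (j : Nat) => decide ((i:Int) ≠ (j:Int) ∧ 0 < row.getD j 0)) = [] := by
    rw [List.filter_eq_nil_iff]
    intro a ha
    simp only [List.mem_map, List.mem_range] at ha
    obtain ⟨x, hx, rfl⟩ := ha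
    have hge : row.length ≤ m + x := by omega
    have h0 : row[m + x]? = none := List.getElem?_eq_none hge
    simp [List.getD, h0]
  rw [htail]
  simp only [List.map_nil, List.append_nil]
  rw [filterMap_if_eq, hm]
  have hfeq : (List.range m).filter (fun (j : Nat) => decide ((i:Int) ≠ (j:Int) ∧ 0 < (row.take n).getD j 0))
      = (List.range m).filter (fun (j : Nat) => decide ((i:Int) ≠ (j:Int) ∧ 0 < row.getD j 0)) := by
    apply List.filter_congr
    intro j hj
    rw [hagree j (List.mem_range.mp hj)]
  rw [hfeq]
  apply List.map_congr_left
  intro j hj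
  have hj' : j < m := List.mem_range.mp (List.mem_filter.mp hj).1
  rw [hagree j hj']

-- the common "confused" list, in a normal form shared by both ports
def pvConfused (cm : List (List Int)) : List ((Int × Int) × Int) :=
  (List.range cm.length).flatMap (fun (i : Nat) =>
    ((List.range cm.length).filter
        (fun (j : Nat) => decide ((i:Int) ≠ (j:Int) ∧ 0 < (cm.getD i []).getD j 0))).map
      (fun (j : Nat) => (((i:Int), (j:Int)), (cm.getD i []).getD j 0)))

theorem pvConfusedA (cm : List (List Int)) :
    ((PySem.List.pyRange 0 (cm.length : Int) 1).foldl (fun acc i =>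
       (PySem.List.pyRange 0 (cm.length : Int) 1).foldl (fun acc j =>
         if i ≠ j ∧ 0 < PySem.List.pyGetD (PySem.List.pyGetD cm i []) j 0 then
           acc ++ [((i, j), PySem.List.pyGetD (PySem.List.pyGetD cm i []) j 0)]
         else acc) acc) []) = pvConfused cm := by
  have hinner : ∀ (i : Int) (acc : List ((Int × Int) × Int)),
      (PySem.List.pyRange 0 (cm.length : Int) 1).foldl (fun acc j =>
        if i ≠ j ∧ 0 < PySem.List.pyGetD (PySem.List.pyGetD cm i []) j 0 then
          acc ++ [((i, j), PySem.List.pyGetD (PySem.List.pyGetD cm i []) j 0)]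
        else acc) acc
      = acc ++ ((PySem.List.pyRange 0 (cm.length : Int) 1).filter
          (fun j => decide (i ≠ j ∧ 0 < PySem.List.pyGetD (PySem.List.pyGetD cm i []) j 0))).map
          (fun j => ((i, j), PySem.List.pyGetD (PySem.List.pyGetD cm i []) j 0)) := by
    intro i acc
    exact PySem.List.foldl_append_ite _ _ _ _
  simp only [hinner]
  rw [PySem.List.foldl_append_eq_flatMap]
  rw [List.nil_append, PySem.List.pyRange_zero_natCast]
  rw [List.flatMap_map]
  unfold pvConfused
  apply List.flatMap_congr
  intro i hi
  rw [List.filter_map, List.map_map]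
  simp [Function.comp_def, PySem.List.pyGetD_natCast, List.getD, Nat.cast_inj]

-- the per-cell stream both ports run over: B inserts each element of this stream as it appears
def pvStream (cm : List (List Int)) : List ((Int × Int) × Int) :=
  (PySem.List.enumerate cm 0).flatMap (fun p =>
    (PySem.List.enumerate (PySem.List.slice p.2 none (some (cm.length : Int))) 0).filterMap (fun q =>
      if p.1 ≠ q.1 ∧ 0 < q.2 then some ((p.1, q.1), q.2) else none))

theorem pvConfusedB (cm : List (List Int)) : pvStream cm = pvConfused cm := by
  unfold pvStream
  rw [PySem.List.enumerate_eq_map_pyRange cm ([] : List Int)]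
  simp only [PySem.List.len_eq]
  rw [PySem.List.pyRange_zero_natCast]
  rw [List.flatMap_map]
  rw [List.flatMap_map]
  unfold pvConfused
  apply List.flatMap_congr
  intro i hi
  simp only [PySem.List.pyGetD_natCast]
  rw [PySem.List.slice_to_natCast]
  rw [PySem.List.enumerate_eq_map_pyRange _ (0 : Int)]
  simp only [PySem.List.len_eq]
  rw [PySem.List.pyRange_zero_natCast, List.filterMap_map]
  simp only [Function.comp_def]
  rw [← rowBridge (cm.getD i []) cm.length i]
  simp [List.getD]

-- a nested accumulate-over-sublists fold is the fold over the flattened list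
theorem foldl_nested {α β σ : Type} (L : List α) (g : α → List β) (step : σ → β → σ) (init : σ) :
    L.foldl (fun s a => (g a).foldl step s) init = (L.flatMap g).foldl step init := by
  induction L generalizing init with
  | nil => rfl
  | cons a L ih => simp [List.flatMap_cons, List.foldl_append, ih]

-- a guarded fold is the fold over the filterMap of its guard
theorem foldl_guard {α β σ : Type} (l : List α) (c : α → Prop) [DecidablePred c] (h : α → β)
    (step : σ → β → σ) (init : σ) :
    l.foldl (fun s a => if c a then step s (h a) else s) init
      = (l.filterMap (fun a => if c a then some (h a) else none)).foldl step init := by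
  induction l generalizing init with
  | nil => rfl
  | cons a l ih =>
    by_cases hc : c a <;> simp [hc, ih]

theorem portA_eq (cm : List (List Int)) (top_n : Int) :
    find_most_confused cm top_n
      = PySem.List.slice (PySem.List.sorted (pvConfused cm) (fun x => x.2) true) none (some top_n) := by
  unfold find_most_confused
  rw [pvConfusedA]

theorem portB_eq (cm : List (List Int)) (top_n : Int) :
    find_most_confused_alt cm top_n
      = PySem.List.slice ((pvConfused cm).foldl (fun acc x =>
          PySem.List.insertBy (fun a b => decide (b.2 < a.2)) x acc) []) none (some top_n) := by
  unfold find_most_confused_alt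
  have hinner : ∀ (p : Int × List Int) (acc : List ((Int × Int) × Int)),
      (PySem.List.enumerate (PySem.List.slice p.2 none (some (cm.length : Int))) 0).foldl (fun acc q =>
        if p.1 ≠ q.1 ∧ 0 < q.2 then
          PySem.List.insertBy (fun a b => decide (b.2 < a.2)) ((p.1, q.1), q.2) acc
        else acc) acc
      = ((PySem.List.enumerate (PySem.List.slice p.2 none (some (cm.length : Int))) 0).filterMap
          (fun q => if p.1 ≠ q.1 ∧ 0 < q.2 then some ((p.1, q.1), q.2) else none)).foldl
          (fun acc x => PySem.List.insertBy (fun a b => decide (b.2 < a.2)) x acc) acc := by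
    intro p acc
    exact foldl_guard _ (fun (q : Int × Int) => p.1 ≠ q.1 ∧ 0 < q.2) (fun (q : Int × Int) => ((p.1, q.1), q.2))
      (fun s x => PySem.List.insertBy (fun a b => decide (b.2 < a.2)) x s) acc
  simp only [hinner]
  rw [foldl_nested]
  rw [← pvStream, pvConfusedB]

-- ===== VERDICT =====
theorem find_most_confused_spec : Claim_equal_find_most_confused := by
  intro cm top_n _ _
  unfold Spec_find_most_confused
  rw [portA_eq, portB_eq]
  rw [PySem.List.sorted_rev_eq_foldl_insertBy]
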